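-- pv_equiv track=rewrite | github.com/mfascia/AdventOfCode | 2024/AoC_11.py | blinks
-- ===== SOURCE A (Python) =====
-- def blinks(stones, iter):
-- 	for _ in range(iter):
-- 		output = []
-- 		for s in stones:
-- 			if s == 0:
-- 				output.append(1)
-- 				continue
-- 			txt = str(s)
-- 			if len(txt) % 2 == 0:
-- 				hp = int(len(txt)/2)
-- 				output.append(int(txt[:hp]))
-- 				output.append(int(txt[hp:]))
-- 				continue
-- 			output.append(2024 * s)
-- 		stones = output
-- 	return stones
-- ===== SOURCE B (Python) =====
-- def blinks(stones, iter):
--     def children(s):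
--         if s == 0:
--             return [1]
--         t = str(s)
--         if len(t) % 2 == 0:
--             h = len(t) // 2
--             return [int(t[:h]), int(t[h:])]
--         return [2024 * s]
--
--     def expand(s, n, out):
--         if n == 0:
--             out.append(s)
--         else:
--             for c in children(s):
--                 expand(c, n - 1, out)
--
--     out = []
--     n = max(iter, 0)
--     for s in stones:
--         expand(s, n, out)
--     return out
-- ===== Notes on version B (the rewrite author's own statement) =====
-- stated objective: alternative
-- what changed: B replaces A's breadth-first layer-by-layer rebuilding of the whole stone list with a per-stone depth-first recursion expand(s, n, out) that applies the same one-step rules down to depth n and appends the leaves to one output accumulator; order is identical because depth-first per-stone order equals layer order.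
-- outside the precondition, e.g. on blinks([-10], 1): A returns [-20240], B returns [-20240]
import Mathlib
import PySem

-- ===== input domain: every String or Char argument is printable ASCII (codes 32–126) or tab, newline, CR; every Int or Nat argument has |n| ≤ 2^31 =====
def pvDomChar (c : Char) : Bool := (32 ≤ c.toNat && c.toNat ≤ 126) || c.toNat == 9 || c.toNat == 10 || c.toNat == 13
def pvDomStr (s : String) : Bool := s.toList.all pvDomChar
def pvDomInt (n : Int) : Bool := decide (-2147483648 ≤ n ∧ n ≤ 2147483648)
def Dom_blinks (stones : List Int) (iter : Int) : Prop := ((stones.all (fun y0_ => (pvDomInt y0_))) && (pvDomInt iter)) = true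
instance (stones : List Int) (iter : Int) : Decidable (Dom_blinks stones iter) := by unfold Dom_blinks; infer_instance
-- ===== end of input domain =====

-- B replaces A's breadth-first layer-by-layer rebuild with a per-stone depth-first recursive
-- expansion (same per-step rules, same order); equivalence is on the return value only.

-- ===== PORT A =====
-- Literal port of A: `for _ in range(iter)` rebuilds the whole list; the inner loop appends to
-- `output`. `int(txt[:hp])` / `int(txt[hp:])` are PySem.Int.ofChars? with `.getD 0`: inside
-- Pre_blinks every such int() succeeds, so the default is never used. `int(len(txt)/2)` is exact
-- division since len is even, ported as `txt.length / 2`.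
def blinks (stones : List Int) (iter : Int) : List Int :=
  (List.range iter.toNat).foldl (fun st _ =>
    st.foldl (fun output s =>
      if s = 0 then output ++ [1]
      else
        let txt := PySem.Int.toChars s
        if txt.length % 2 == 0 then
          let hp := txt.length / 2
          output ++ [(PySem.Int.ofChars? (PySem.List.slice txt none (some (hp : Int)))).getD 0,
                     (PySem.Int.ofChars? (PySem.List.slice txt (some (hp : Int)) none)).getD 0]
        else output ++ [2024 * s]) []) stones

-- ===== PORT B =====
-- Port of Source B: children gives the one-step successors; expand is the depth-first recursion
-- appending leaves to the accumulator `out` (its `for c in children(s)` loop is the foldl);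
-- t[:h] / t[h:] with h = len//2 ≥ 0 ported as take/drop; int() again ofChars? with .getD 0.
def pvChildren (s : Int) : List Int :=
  if s = 0 then [1]
  else
    let t := PySem.Int.toChars s
    if t.length % 2 == 0 then
      let h := t.length / 2
      [(PySem.Int.ofChars? (t.take h)).getD 0, (PySem.Int.ofChars? (t.drop h)).getD 0]
    else [2024 * s]

def pvExpandAcc : Nat → Int → List Int → List Int
  | 0, s, out => out ++ [s]
  | n + 1, s, out => (pvChildren s).foldl (fun out c => pvExpandAcc n c out) out

-- n = max(iter, 0) is iter.toNat; the `for s in stones` loop is the foldl over stones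
def blinks_alt (stones : List Int) (iter : Int) : List Int :=
  stones.foldl (fun out s => pvExpandAcc iter.toNat s out) []

-- ===== PRECONDITION & SPEC =====
-- Pre_ excludes inputs with a negative stone when iter > 0: there Python's int(txt[:hp]) can raise
-- ValueError (e.g. blinks([-5], 1) raises on int('-')); on negatives where A happens to return,
-- B returns the same value (see cites), so Pre_ is only as narrow as the raise risk requires.
def Pre_blinks (stones : List Int) (iter : Int) : Prop :=
  iter ≤ 0 ∨ ∀ s ∈ stones, 0 ≤ s
instance (stones : List Int) (iter : Int) : Decidable (Pre_blinks stones iter) := by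
  unfold Pre_blinks; infer_instance

def pvWitness_blinks : List Int × Int := ([125, 17], 3)

def Spec_blinks (stones : List Int) (iter : Int) (out : List Int) : Prop := out = blinks_alt stones iter
instance (stones : List Int) (iter : Int) (out : List Int) : Decidable (Spec_blinks stones iter out) := by unfold Spec_blinks; infer_instance

-- ===== CLAIM (what is proved, stated in full; the proofs are below) =====
def Claim_equal_blinks : Prop := ∀ (stones : List Int) (iter : Int), Dom_blinks stones iter → Pre_blinks stones iter → Spec_blinks stones iter (blinks stones iter)

-- ===== LEMMAS AND PROOFS =====

-- Proof-side view of B: the list a full expansion of one stone produces.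
def pvExpand : Nat → Int → List Int
  | 0, s => [s]
  | n + 1, s => (pvChildren s).flatMap (pvExpand n)

theorem expandAcc_eq (n : Nat) : ∀ (s : Int) (out : List Int),
    pvExpandAcc n s out = out ++ pvExpand n s := by
  induction n with
  | zero => intro s out; simp [pvExpandAcc, pvExpand]
  | succ n ih =>
      have hl : ∀ (l : List Int) (out : List Int),
          l.foldl (fun out c => pvExpandAcc n c out) out = out ++ l.flatMap (pvExpand n) := by
        intro l
        induction l with
        | nil => simp
        | cons a t iht => intro out; rw [List.foldl_cons, ih, iht, List.flatMap_cons, List.append_assoc]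
      intro s out
      simp [pvExpandAcc, pvExpand, hl]

theorem foldl_expandAcc (k : Nat) (stones : List Int) (out : List Int) :
    stones.foldl (fun out s => pvExpandAcc k s out) out = out ++ stones.flatMap (pvExpand k) := by
  induction stones generalizing out with
  | nil => simp
  | cons a t iht => rw [List.foldl_cons, expandAcc_eq, iht, List.flatMap_cons, List.append_assoc]

-- A's inner loop body appends exactly the one-step children of s.
theorem blinks_inner_body (output : List Int) (s : Int) :
    (if s = 0 then output ++ [1]
     else
       let txt := PySem.Int.toChars s
       if txt.length % 2 == 0 then
         let hp := txt.length / 2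
         output ++ [(PySem.Int.ofChars? (PySem.List.slice txt none (some (hp : Int)))).getD 0,
                    (PySem.Int.ofChars? (PySem.List.slice txt (some (hp : Int)) none)).getD 0]
       else output ++ [2024 * s]) = output ++ pvChildren s := by
  unfold pvChildren
  by_cases h0 : s = 0
  · simp [h0]
  · rw [if_neg h0, if_neg h0]
    by_cases he : ((PySem.Int.toChars s).length % 2 == 0) = true
    · rw [if_pos he, if_pos he]
      simp only [PySem.List.slice_to_natCast, PySem.List.slice_from_natCast]
    · rw [if_neg he, if_neg he]

-- A's inner fold over one layer is a flatMap of the one-step children.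
theorem blinks_inner_fold (st : List Int) (output : List Int) :
    st.foldl (fun output s =>
      if s = 0 then output ++ [1]
      else
        let txt := PySem.Int.toChars s
        if txt.length % 2 == 0 then
          let hp := txt.length / 2
          output ++ [(PySem.Int.ofChars? (PySem.List.slice txt none (some (hp : Int)))).getD 0,
                     (PySem.Int.ofChars? (PySem.List.slice txt (some (hp : Int)) none)).getD 0]
        else output ++ [2024 * s]) output = output ++ st.flatMap pvChildren := by
  induction st generalizing output with
  | nil => simp
  | cons a l ih =>
      rw [List.foldl_cons, blinks_inner_body, ih, List.flatMap_cons, List.append_assoc]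

-- The outer fold ignores the range element: k layers from `stones`.
theorem blinks_outer (k : Nat) (stones : List Int) :
    (List.range k).foldl (fun st (_ : Nat) => st.flatMap pvChildren) stones
      = stones.flatMap (pvExpand k) := by
  induction k generalizing stones with
  | zero => simp [pvExpand]
  | succ n ih =>
      have hsplit : (List.range (n + 1)) = 0 :: (List.range n).map Nat.succ := by
        simp [List.range_succ_eq_map]
      rw [hsplit, List.foldl_cons, List.foldl_map, ih]
      simp [pvExpand, List.flatMap_assoc]

-- ===== VERDICT (by name: the statement is the Claim_ definition above) =====
theorem blinks_spec : Claim_equal_blinks := by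
  intro stones iter _ _
  unfold Spec_blinks blinks blinks_alt
  calc (List.range iter.toNat).foldl (fun st _ =>
        st.foldl (fun output s =>
          if s = 0 then output ++ [1]
          else
            let txt := PySem.Int.toChars s
            if txt.length % 2 == 0 then
              let hp := txt.length / 2
              output ++ [(PySem.Int.ofChars? (PySem.List.slice txt none (some (hp : Int)))).getD 0,
                         (PySem.Int.ofChars? (PySem.List.slice txt (some (hp : Int)) none)).getD 0]
            else output ++ [2024 * s]) []) stones
      = (List.range iter.toNat).foldl (fun st (_ : Nat) => st.flatMap pvChildren) stones := by
        have hf : (fun (st : List Int) (_ : Nat) =>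
            st.foldl (fun output s =>
              if s = 0 then output ++ [1]
              else
                let txt := PySem.Int.toChars s
                if txt.length % 2 == 0 then
                  let hp := txt.length / 2
                  output ++ [(PySem.Int.ofChars? (PySem.List.slice txt none (some (hp : Int)))).getD 0,
                             (PySem.Int.ofChars? (PySem.List.slice txt (some (hp : Int)) none)).getD 0]
                else output ++ [2024 * s]) [])
            = (fun (st : List Int) (_ : Nat) => st.flatMap pvChildren) := by
          funext st _
          exact blinks_inner_fold st []
        rw [hf]
    _ = stones.flatMap (pvExpand iter.toNat) := blinks_outer iter.toNat stones
    _ = stones.foldl (fun out s => pvExpandAcc iter.toNat s out) [] := by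
        rw [foldl_expandAcc, List.nil_append]
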